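-- pv_equiv track=rewrite | github.com/Surendhar2252/placement-training | 23.07.2024/Cutting Boards.py | min_cost_to_cut_board
-- ===== SOURCE A (Python) =====
-- def min_cost_to_cut_board(cost_y, cost_x):
--     cost_y.sort(reverse=True)
--     cost_x.sort(reverse=True)
--     h_cuts = v_cuts = 1
--     total_cost = 0
--
--     while cost_y or cost_x:
--         if not cost_x or (cost_y and cost_y[0] >= cost_x[0]):
--             total_cost += cost_y.pop(0) * v_cuts
--             h_cuts += 1
--         else:
--             total_cost += cost_x.pop(0) * h_cuts
--             v_cuts += 1
--
--     return total_cost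
-- ===== SOURCE B (Python) =====
-- def min_cost_to_cut_board(cost_y, cost_x):
--     ys = sorted(cost_y, reverse=True)
--     xs = sorted(cost_x, reverse=True)
--     i = j = 0
--     total = 0
--     while i < len(ys) and j < len(xs):
--         if ys[i] >= xs[j]:
--             total += ys[i] * (j + 1)
--             i += 1
--         else:
--             total += xs[j] * (i + 1)
--             j += 1
--     total += (j + 1) * sum(ys[i:])
--     total += (i + 1) * sum(xs[j:])
--     return total
-- ===== Notes on version B (the rewrite author's own statement) =====
-- stated objective: faster
-- what changed: B replaces A's destructive pop(0) loop on in-place-sorted lists with an index-based two-pointer merge over sorted copies plus closed-form sums for the leftovers (note: A mutates and empties its arguments; B does not, equivalence is about the return value).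
import Mathlib
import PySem

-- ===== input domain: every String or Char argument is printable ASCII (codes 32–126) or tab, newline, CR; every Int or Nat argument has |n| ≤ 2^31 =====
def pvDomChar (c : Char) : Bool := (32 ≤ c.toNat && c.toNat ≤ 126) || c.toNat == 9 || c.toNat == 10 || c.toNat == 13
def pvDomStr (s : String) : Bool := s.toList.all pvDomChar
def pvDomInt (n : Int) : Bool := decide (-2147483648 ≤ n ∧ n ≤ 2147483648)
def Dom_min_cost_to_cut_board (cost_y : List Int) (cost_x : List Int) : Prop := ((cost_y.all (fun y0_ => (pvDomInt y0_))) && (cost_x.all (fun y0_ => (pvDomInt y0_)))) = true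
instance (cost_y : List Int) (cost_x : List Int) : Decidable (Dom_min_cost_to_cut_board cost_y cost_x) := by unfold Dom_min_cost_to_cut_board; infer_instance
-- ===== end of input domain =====

-- B: index-based two-pointer merge over sorted copies instead of A's pop(0) loop — asymptotically
-- faster (O(n log n) vs O(n^2)); return-value equivalence only: Python A mutates (sorts and empties)
-- its argument lists, B does not.

-- ===== PORT A =====
-- A's while loop: pops the head of one of the two (descending-sorted) lists each iteration.
def pvALoop : List Int → List Int → Int → Int → Int → Int
  | [], [], _, _, t => t
  | y :: ys, [], h, v, t => pvALoop ys [] (h + 1) v (t + y * v)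
  | [], x :: xs, h, v, t => pvALoop [] xs h (v + 1) (t + x * h)
  | y :: ys, x :: xs, h, v, t =>
    if y ≥ x then pvALoop ys (x :: xs) (h + 1) v (t + y * v)
    else pvALoop (y :: ys) xs h (v + 1) (t + x * h)

def min_cost_to_cut_board (cost_y : List Int) (cost_x : List Int) : Int :=
  pvALoop (PySem.List.sorted cost_y (fun z => z) true)
          (PySem.List.sorted cost_x (fun z => z) true) 1 1 0

-- ===== PORT B =====
-- B's while loop: two index pointers into fixed sorted lists, then closed-form leftover sums.
def pvBLoop (ys xs : List Int) (i j : Nat) (t : Int) : Int :=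
  if hij : i < ys.length ∧ j < xs.length then
    if ys[i]'hij.1 ≥ xs[j]'hij.2 then
      pvBLoop ys xs (i + 1) j (t + ys[i]'hij.1 * ((j : Int) + 1))
    else
      pvBLoop ys xs i (j + 1) (t + xs[j]'hij.2 * ((i : Int) + 1))
  else
    t + ((j : Int) + 1) * (ys.drop i).sum + ((i : Int) + 1) * (xs.drop j).sum
termination_by (ys.length - i) + (xs.length - j)
decreasing_by all_goals omega

def min_cost_to_cut_board_alt (cost_y : List Int) (cost_x : List Int) : Int :=
  pvBLoop (PySem.List.sorted cost_y (fun z => z) true)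
          (PySem.List.sorted cost_x (fun z => z) true) 0 0 0

-- ===== PRECONDITION & SPEC =====
def Spec_min_cost_to_cut_board (cost_y : List Int) (cost_x : List Int) (out : Int) : Prop := out = min_cost_to_cut_board_alt cost_y cost_x
instance (cost_y : List Int) (cost_x : List Int) (out : Int) : Decidable (Spec_min_cost_to_cut_board cost_y cost_x out) := by unfold Spec_min_cost_to_cut_board; infer_instance

-- ===== CLAIM (what is proved, stated in full; the proofs are below) =====
def Claim_equal_min_cost_to_cut_board : Prop := ∀ (cost_y : List Int) (cost_x : List Int), Dom_min_cost_to_cut_board cost_y cost_x → Spec_min_cost_to_cut_board cost_y cost_x (min_cost_to_cut_board cost_y cost_x)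

-- ===== LEMMAS AND PROOFS =====

theorem pvALoop_nil_right (ys : List Int) (h v t : Int) :
    pvALoop ys [] h v t = t + v * ys.sum := by
  induction ys generalizing h t with
  | nil => simp [pvALoop]
  | cons y ys ih => simp [pvALoop, ih]; ring

theorem pvALoop_nil_left (xs : List Int) (h v t : Int) :
    pvALoop [] xs h v t = t + h * xs.sum := by
  induction xs generalizing v t with
  | nil => simp [pvALoop]
  | cons x xs ih => simp [pvALoop, ih]; ring

theorem pvLoop_agree (ys xs : List Int) (i j : Nat) (t : Int) :
    pvALoop (ys.drop i) (xs.drop j) ((i : Int) + 1) ((j : Int) + 1) t = pvBLoop ys xs i j t := by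
  fun_induction pvBLoop ys xs i j t with
  | case1 i j t hij hge ih =>
    rw [List.drop_eq_getElem_cons hij.1, List.drop_eq_getElem_cons hij.2]
    simp only [pvALoop, if_pos hge]
    rw [List.drop_eq_getElem_cons hij.2] at ih
    push_cast at ih ⊢
    convert ih using 2
  | case2 i j t hij hge ih =>
    rw [List.drop_eq_getElem_cons hij.1, List.drop_eq_getElem_cons hij.2]
    simp only [pvALoop, if_neg hge]
    rw [List.drop_eq_getElem_cons hij.1] at ih
    push_cast at ih ⊢
    convert ih using 2
  | case3 i j t hij =>
    rcases Nat.lt_or_ge i ys.length with hi | hi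
    · have hj : xs.length ≤ j := by omega
      rw [List.drop_eq_nil_of_le hj, pvALoop_nil_right]
      simp
    · rw [List.drop_eq_nil_of_le hi, pvALoop_nil_left]
      simp

-- ===== VERDICT (by name: the statement is the Claim_ definition above) =====
theorem min_cost_to_cut_board_spec : Claim_equal_min_cost_to_cut_board := by
  intro cost_y cost_x _
  unfold Spec_min_cost_to_cut_board min_cost_to_cut_board min_cost_to_cut_board_alt
  simpa using pvLoop_agree (PySem.List.sorted cost_y (fun z => z) true)
    (PySem.List.sorted cost_x (fun z => z) true) 0 0 0
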